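-- pv_equiv track=rewrite | github.com/radimzitka/advent-2021 | 12.py | two_lower
-- ===== SOURCE A (Python) =====
-- def two_lower(path, rule):
--     if(path.count(rule) == 0):
--         return True
--
--     is_there_any_two_lower = False
--
--     for item in path:
--         if(item.islower() and path.count(item) > 1):
--             is_there_any_two_lower = True
--
--     if(is_there_any_two_lower and path.count(rule) >= 1):
--         return False
--
--     return True
-- ===== SOURCE B (Python) =====
-- def two_lower(path, rule):
--     if rule not in path:
--         return True
--     lows = sorted(item for item in path if item.islower())
--     return all(a != b for a, b in zip(lows, lows[1:]))
-- ===== Notes on version B (the rewrite author's own statement) =====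
-- stated objective: alternative
-- what changed: Instead of A's per-item full-list count() scans, B sorts the lowercase caves and checks that no two adjacent entries of the sorted list are equal (duplicates in a sorted list are adjacent).
import Mathlib
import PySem

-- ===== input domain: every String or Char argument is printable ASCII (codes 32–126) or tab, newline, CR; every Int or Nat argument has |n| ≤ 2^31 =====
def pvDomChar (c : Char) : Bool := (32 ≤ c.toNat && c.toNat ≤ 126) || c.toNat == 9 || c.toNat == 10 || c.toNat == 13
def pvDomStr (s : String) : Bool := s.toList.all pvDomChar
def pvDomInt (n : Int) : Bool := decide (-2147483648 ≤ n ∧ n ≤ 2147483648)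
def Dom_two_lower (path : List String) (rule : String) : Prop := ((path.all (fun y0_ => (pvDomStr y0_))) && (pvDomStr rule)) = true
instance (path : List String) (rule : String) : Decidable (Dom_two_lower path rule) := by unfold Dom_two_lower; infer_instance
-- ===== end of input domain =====

-- B sorts the lowercase caves and checks adjacent entries for equality instead of A's
-- per-item full-list count() scans (return value only; neither mutates its arguments).


-- str.islower(): at least one lowercase letter and no uppercase letter — exact on the
-- printable-ASCII domain (where the cased characters are exactly the letters).
def pyStrIslower (s : String) : Bool :=
  s.toList.any PySem.Chars.islower && s.toList.all (fun c => !(PySem.Chars.isupper c))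

-- ===== PORT A =====
def two_lower (path : List String) (rule : String) : Bool :=
  if PySem.List.count path rule = 0 then true
  else
    let flag := path.foldl
      (fun acc item =>
        if pyStrIslower item && decide (PySem.List.count path item > 1) then true else acc)
      false
    if flag && decide (PySem.List.count path rule ≥ 1) then false else true

-- ===== PORT B =====
def two_lower_alt (path : List String) (rule : String) : Bool :=
  if !(path.contains rule) then true
  else
    let lows := PySem.List.sorted (path.filter pyStrIslower) (fun x => x) false
    (lows.zip (lows.drop 1)).all (fun p => p.1 != p.2)

-- ===== PRECONDITION & SPEC =====
def Spec_two_lower (path : List String) (rule : String) (out : Bool) : Prop := out = two_lower_alt path rule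
instance (path : List String) (rule : String) (out : Bool) : Decidable (Spec_two_lower path rule out) := by unfold Spec_two_lower; infer_instance

-- ===== CLAIM (what is proved, stated in full; the proofs are below) =====
def Claim_equal_two_lower : Prop := ∀ (path : List String) (rule : String), Dom_two_lower path rule → Spec_two_lower path rule (two_lower path rule)

-- ===== LEMMAS AND PROOFS =====

-- A's flag loop is an `any` over the fixed predicate.
theorem foldl_if_true (q : String → Bool) (l : List String) (b : Bool) :
    l.foldl (fun acc item => if q item then true else acc) b = (b || l.any q) := by
  induction l generalizing b with
  | nil => simp
  | cons x xs ih =>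
    simp only [List.foldl_cons, List.any_cons, ih]
    by_cases h : q x = true <;> simp [h]

-- "some lowercase item occurs twice" = "the lowercase items are not nodup".
theorem any_dup_iff (l : List String) :
    (l.any (fun item => pyStrIslower item && decide (PySem.List.count l item > 1)) = true) ↔
      ¬ (l.filter pyStrIslower).Nodup := by
  rw [List.any_eq_true]
  constructor
  · rintro ⟨x, hx, hq⟩
    simp only [Bool.and_eq_true, decide_eq_true_eq] at hq
    intro hnd
    have hcf : (l.filter pyStrIslower).count x = l.count x := by
      rw [List.count_filter]
      simp [hq.1]
    have hle := List.nodup_iff_count_le_one.1 hnd x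
    rw [hcf] at hle
    have hce : PySem.List.count l x = l.count x := PySem.List.count_eq l x
    omega
  · intro hnd
    have h1 : ¬ ∀ a, (l.filter pyStrIslower).count a ≤ 1 :=
      fun h => hnd (List.nodup_iff_count_le_one.2 h)
    push Not at h1
    obtain ⟨x, hx⟩ := h1
    have hxmem : x ∈ l.filter pyStrIslower := List.count_pos_iff.1 (by omega)
    rcases List.mem_filter.1 hxmem with ⟨hxl, hpx⟩
    have hcf : (l.filter pyStrIslower).count x = l.count x := by
      rw [List.count_filter]; simp [hpx]
    refine ⟨x, hxl, ?_⟩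
    simp only [Bool.and_eq_true, decide_eq_true_eq]
    refine ⟨hpx, ?_⟩
    rw [PySem.List.count_eq]
    omega

-- On a ≤-sorted list, "no two adjacent entries equal" is exactly Nodup
-- (equal elements of a sorted list are adjacent).
theorem adj_ne_iff_nodup : ∀ (l : List String), l.Pairwise (· ≤ ·) →
    (((l.zip (l.drop 1)).all (fun p => p.1 != p.2)) = true ↔ l.Nodup)
  | [], _ => by simp
  | [a], _ => by simp
  | a :: b :: t, hp => by
    have hp' : (b :: t).Pairwise (fun x y => x ≤ y) := hp.tail
    have hab : a ≤ b := (List.pairwise_cons.1 hp).1 b List.mem_cons_self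
    have hble : ∀ y ∈ t, b ≤ y := fun y hy => (List.pairwise_cons.1 hp').1 y hy
    have hale : ∀ y ∈ b :: t, a ≤ y := (List.pairwise_cons.1 hp).1
    have ih := adj_ne_iff_nodup (b :: t) hp'
    show ((a, b) :: ((b :: t).zip t)).all (fun p => p.1 != p.2) = true ↔ _
    rw [List.all_cons, Bool.and_eq_true, List.nodup_cons]
    have hzip : ((b :: t).zip ((b :: t).drop 1)) = ((b :: t).zip t) := rfl
    rw [hzip] at ih
    constructor
    · rintro ⟨hne, hrest⟩
      have hane : a ≠ b := by simpa using hne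
      refine ⟨?_, ih.1 hrest⟩
      intro hmem
      rcases List.mem_cons.1 hmem with rfl | hmt
      · exact hane rfl
      · exact hane (le_antisymm hab (hble a hmt))
    · rintro ⟨hnm, hnd⟩
      have hane : a ≠ b := fun h => hnm (h ▸ List.mem_cons_self)
      exact ⟨by simpa using hane, ih.2 hnd⟩

-- ===== VERDICT (by name: the statement is the Claim_ definition above) =====
theorem two_lower_spec : Claim_equal_two_lower := by
  intro path rule _dom
  unfold Spec_two_lower
  by_cases hmem : rule ∈ path
  · have hcount : ¬ PySem.List.count path rule = 0 := by
      rw [PySem.List.count_eq]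
      simpa [List.count_eq_zero] using hmem
    have hge : decide (PySem.List.count path rule ≥ 1) = true := by
      simp only [decide_eq_true_eq]
      omega
    have hA : two_lower path rule =
        !(path.any (fun item => pyStrIslower item && decide (PySem.List.count path item > 1))) := by
      unfold two_lower
      rw [if_neg hcount]
      show (if (path.foldl
          (fun acc item =>
            if pyStrIslower item && decide (PySem.List.count path item > 1) then true else acc)
          false) && decide (PySem.List.count path rule ≥ 1) then false else true) = _
      rw [foldl_if_true, hge, Bool.false_or, Bool.and_true]
      cases hany : path.any
          (fun item => pyStrIslower item && decide (PySem.List.count path item > 1)) <;> simp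
    have hB : two_lower_alt path rule =
        ((PySem.List.sorted (path.filter pyStrIslower) (fun x => x) false).zip
          ((PySem.List.sorted (path.filter pyStrIslower) (fun x => x) false).drop 1)).all
          (fun p => p.1 != p.2) := by
      simp only [two_lower_alt]
      rw [if_neg (by simp; exact hmem)]
    have hsortpw : (PySem.List.sorted (path.filter pyStrIslower) (fun x => x) false).Pairwise
        (· ≤ ·) := PySem.List.sorted_pairwise _ _
    have hperm : (PySem.List.sorted (path.filter pyStrIslower) (fun x => x) false).Perm
        (path.filter pyStrIslower) := PySem.List.sorted_perm _ _ _
    have hBiff : two_lower_alt path rule = true ↔ (path.filter pyStrIslower).Nodup := by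
      rw [hB, adj_ne_iff_nodup _ hsortpw]
      exact hperm.nodup_iff
    rw [hA]
    by_cases hnd : (path.filter pyStrIslower).Nodup
    · have h2 : path.any
          (fun item => pyStrIslower item && decide (PySem.List.count path item > 1)) = false := by
        cases hq : path.any
            (fun item => pyStrIslower item && decide (PySem.List.count path item > 1))
        · rfl
        · exact absurd hnd ((any_dup_iff path).1 hq)
      rw [h2, hBiff.2 hnd]
      rfl
    · have h2 : path.any
          (fun item => pyStrIslower item && decide (PySem.List.count path item > 1)) = true :=
        (any_dup_iff path).2 hnd
      have h3 : two_lower_alt path rule = false := by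
        cases hs : two_lower_alt path rule
        · rfl
        · exact absurd (hBiff.1 hs) hnd
      rw [h2, h3]
      rfl
  · have hcount : PySem.List.count path rule = 0 := by
      rw [PySem.List.count_eq]
      simpa [List.count_eq_zero] using hmem
    have hA : two_lower path rule = true := by
      unfold two_lower
      rw [if_pos hcount]
    have hB : two_lower_alt path rule = true := by
      simp only [two_lower_alt]
      rw [if_pos (by simp; exact hmem)]
    rw [hA, hB]
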